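-- pv_equiv track=rewrite | github.com/anniphung/KdP_Aufgaben | RekursionUndSchleifenAbgabe.py | lovedDigits_R
-- ===== SOURCE A (Python) =====
-- def lovedDigits_R(n):
--     if n == 0:
--         return 0
--     else:
--         lastDigit = n % 10
--         if lastDigit == 0:
--             lovedDigit = 0
--         else:
--             lovedDigit = 10 - lastDigit
--
--         remaining_n = n // 10
--     return lovedDigit + (lovedDigits_R(remaining_n)* 10)
-- ===== SOURCE B (Python) =====
-- def lovedDigits_R(n):
--     result = 0
--     place = 1
--     while n != 0:
--         d = n % 10
--         result += (0 if d == 0 else 10 - d) * place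
--         place *= 10
--         n //= 10
--     return result
-- ===== Notes on version B (the rewrite author's own statement) =====
-- stated objective: simpler
-- what changed: Replaces the recursion (compute last digit's complement, recurse on n//10, scale by 10) with a single iterative while-loop that accumulates each digit's complement times a running place value.
import Mathlib
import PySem

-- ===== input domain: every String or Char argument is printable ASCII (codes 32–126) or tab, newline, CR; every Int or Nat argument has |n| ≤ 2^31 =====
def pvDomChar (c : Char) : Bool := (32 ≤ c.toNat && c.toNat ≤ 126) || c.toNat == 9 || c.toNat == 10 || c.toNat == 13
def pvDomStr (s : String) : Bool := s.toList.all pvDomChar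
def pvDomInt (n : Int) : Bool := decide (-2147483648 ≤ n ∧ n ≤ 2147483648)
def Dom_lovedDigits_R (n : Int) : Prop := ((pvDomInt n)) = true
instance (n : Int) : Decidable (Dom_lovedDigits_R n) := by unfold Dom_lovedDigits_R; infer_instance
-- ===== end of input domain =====

-- B replaces the per-digit recursion with one iterative loop accumulating complement*place; return value only.

-- ===== PORT A =====
-- fuel makes the recursion total in Lean; for 0 ≤ n the fuel n.toNat+1 is always enough
-- (exactly Python's recursion; on n < 0 Python never terminates, excluded by Pre_)
def lovedDigits_R_go : Nat → Int → Int
  | 0, _ => 0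
  | fuel + 1, n =>
    if n == 0 then 0
    else
      let lastDigit := PySem.Int.mod n 10
      let lovedDigit := if lastDigit == 0 then (0 : Int) else 10 - lastDigit
      let remaining_n := PySem.Int.floordiv n 10
      lovedDigit + lovedDigits_R_go fuel remaining_n * 10

def lovedDigits_R (n : Int) : Int := lovedDigits_R_go (n.toNat + 1) n

-- ===== PORT B =====
def lovedDigits_R_alt_go : Nat → Int → Int → Int → Int
  | 0, _, _, result => result
  | fuel + 1, n, place, result =>
    if n == 0 then result
    else
      let d := PySem.Int.mod n 10
      lovedDigits_R_alt_go fuel (PySem.Int.floordiv n 10) (place * 10)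
        (result + (if d == 0 then (0 : Int) else 10 - d) * place)

def lovedDigits_R_alt (n : Int) : Int := lovedDigits_R_alt_go (n.toNat + 1) n 1 0

-- ===== PRECONDITION & SPEC =====
-- Pre_ excludes negative n: there Python A exceeds the recursion limit (RecursionError) and B's loop never terminates.
def Pre_lovedDigits_R (n : Int) : Prop := 0 ≤ n
instance (n : Int) : Decidable (Pre_lovedDigits_R n) := by unfold Pre_lovedDigits_R; infer_instance
def pvWitness_lovedDigits_R : Int := 102

def Spec_lovedDigits_R (n : Int) (out : Int) : Prop := out = lovedDigits_R_alt n
instance (n : Int) (out : Int) : Decidable (Spec_lovedDigits_R n out) := by unfold Spec_lovedDigits_R; infer_instance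

-- ===== CLAIM (what is proved, stated in full; the proofs are below) =====
def Claim_equal_lovedDigits_R : Prop := ∀ (n : Int), Dom_lovedDigits_R n → Pre_lovedDigits_R n → Spec_lovedDigits_R n (lovedDigits_R n)

-- ===== LEMMAS AND PROOFS =====

lemma fd10_lt (n : Int) (h0 : 0 ≤ n) (hne : n ≠ 0) :
    (PySem.Int.floordiv n 10).toNat < n.toNat ∧ 0 ≤ PySem.Int.floordiv n 10 := by
  rw [PySem.Int.floordiv_eq_ediv_of_pos (by omega)]
  omega

-- both loops with any sufficient fuel compute the same number, B shifted by result + place * (·)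
lemma key : ∀ (k : Nat) (n : Int), 0 ≤ n → n.toNat ≤ k →
    ∀ (f1 f2 : Nat) (place result : Int), n.toNat < f1 → n.toNat < f2 →
    lovedDigits_R_alt_go f2 n place result = result + place * lovedDigits_R_go f1 n := by
  intro k
  induction k with
  | zero =>
    intro n h0 hk f1 f2 place result h1 h2
    have hn : n = 0 := by omega
    subst hn
    match f1, f2 with
    | a + 1, b + 1 => simp [lovedDigits_R_go, lovedDigits_R_alt_go]
  | succ k ih =>
    intro n h0 hk f1 f2 place result h1 h2
    match f1, f2 with
    | a + 1, b + 1 =>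
      by_cases hz : n = 0
      · subst hz; simp [lovedDigits_R_go, lovedDigits_R_alt_go]
      · have hfd := fd10_lt n h0 hz
        have hz' : (n == 0) = false := by simp [hz]
        simp only [lovedDigits_R_go, lovedDigits_R_alt_go, hz', Bool.false_eq_true, if_false]
        rw [ih (PySem.Int.floordiv n 10) hfd.2 (by omega) a b (place * 10) _ (by omega) (by omega)]
        ring

-- ===== VERDICT (by name: the statement is the Claim_ definition above) =====
theorem lovedDigits_R_spec : Claim_equal_lovedDigits_R := by
  intro n _ hpre
  unfold Spec_lovedDigits_R lovedDigits_R lovedDigits_R_alt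
  rw [key n.toNat n hpre le_rfl (n.toNat + 1) (n.toNat + 1) 1 0 (by omega) (by omega)]
  ring
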